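-- pv_equiv track=rewrite | github.com/nboun/mfc-laboratoire | modules/fds-parser.py | validate_cas_checkdigit
-- ===== SOURCE A (Python) =====
-- def validate_cas_checkdigit(cas_str):
--     """Vérifier le check digit d'un numéro CAS.
--
--     Le dernier chiffre est un check digit calculé ainsi :
--     Pour un CAS abc...xyz-ab-C :
--     - Retirer les tirets -> séquence de chiffres
--     - Le dernier chiffre C est le check
--     - Somme = 1*avant-dernier + 2*avant-avant-dernier + 3*... etc.
--     - Check = somme % 10
--
--     Source: Chemical Abstracts Service (CAS) Registry, ACS
--     """
--     digits = cas_str.replace('-', '')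
--     if len(digits) < 4:
--         return False
--     try:
--         check = int(digits[-1])
--         total = 0
--         for i, d in enumerate(reversed(digits[:-1])):
--             total += (i + 1) * int(d)
--         return total % 10 == check
--     except (ValueError, IndexError):
--         return False
-- ===== SOURCE B (Python) =====
-- def validate_cas_checkdigit(cas_str):
--     """Check a CAS number's check digit in two stages: parse every digit
--     first, then total the digit values via running cumulative sums
--     (weights 1,2,3,... from the right equal the summed prefix sums)."""
--     digits = cas_str.replace('-', '')
--     if len(digits) < 4:
--         return False
--     try:
--         vals = [int(d) for d in digits]
--     except ValueError:
--         return False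
--     check = vals.pop()
--     running = 0
--     total = 0
--     for v in vals:
--         running += v
--         total += running
--     return total % 10 == check
-- ===== Notes on version B (the rewrite author's own statement) =====
-- stated objective: alternative
-- what changed: Replaces A's single enumerate-over-reversed-chars loop computing (i+1)*int(d) by two stages: first parse all digits into an int list (try/except around the whole parse), then pop the check digit and total the body via a running-prefix-sum recurrence, using the identity that right-weights 1,2,3,... equal summed cumulative prefix sums.
import Mathlib
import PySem

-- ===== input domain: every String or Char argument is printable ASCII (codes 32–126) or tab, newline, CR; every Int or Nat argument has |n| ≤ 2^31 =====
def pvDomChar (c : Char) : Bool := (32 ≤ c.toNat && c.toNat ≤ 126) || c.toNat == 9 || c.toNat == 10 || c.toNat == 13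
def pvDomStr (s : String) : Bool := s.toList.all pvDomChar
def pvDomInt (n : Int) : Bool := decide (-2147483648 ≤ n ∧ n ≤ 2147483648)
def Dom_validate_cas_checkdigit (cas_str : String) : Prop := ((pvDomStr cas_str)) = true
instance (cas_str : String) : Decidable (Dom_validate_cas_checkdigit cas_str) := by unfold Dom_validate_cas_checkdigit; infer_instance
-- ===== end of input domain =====

-- B stages the work differently: parse all digits to an int list first, then pop the check digit
-- and total the body with a running-prefix-sum recurrence (same cost; objective: alternative).

-- ===== PORT A =====
-- check = int(digits[-1]); for i, d in enumerate(reversed(digits[:-1])): total += (i+1)*int(d);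
-- none = ValueError inside the loop
def casLoopA : List Char → Int → Int → Option Int
  | [], _, tot => some tot
  | c :: rest, i, tot =>
    match PySem.Int.ofChars? [c] with
    | none => none
    | some v => casLoopA rest (i + 1) (tot + (i + 1) * v)

def validate_cas_checkdigit (cas_str : String) : Bool :=
  let digits := (PySem.Str.replace cas_str "-" "").toList
  if digits.length < 4 then false
  else
    match PySem.List.pyGet? digits (-1) with
    | none => false
    | some lastC =>
      match PySem.Int.ofChars? [lastC] with
      | none => false
      | some check =>
        match casLoopA (PySem.List.slice digits none (some (-1))).reverse 0 0 with
        | none => false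
        | some total => PySem.Int.mod total 10 == check

-- ===== PORT B =====
-- vals = [int(d) for d in digits]  (none = ValueError anywhere in the comprehension)
def casParse? : List Char → Option (List Int)
  | [] => some []
  | c :: cs => (PySem.Int.ofChars? [c]).bind fun v => (casParse? cs).map (v :: ·)

-- running = 0; total = 0; for v in vals: running += v; total += running
def casRunTotal (vals : List Int) : Int × Int :=
  vals.foldl (fun p v => (p.1 + v, p.2 + (p.1 + v))) (0, 0)

def validate_cas_checkdigit_alt (cas_str : String) : Bool :=
  let digits := (PySem.Str.replace cas_str "-" "").toList
  if digits.length < 4 then false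
  else
    match casParse? digits with
    | none => false
    | some vals =>
      match PySem.List.pop? vals (-1) with
      | none => false
      | some (check, body) => PySem.Int.mod (casRunTotal body).2 10 == check

-- ===== PRECONDITION & SPEC =====
def Spec_validate_cas_checkdigit (cas_str : String) (out : Bool) : Prop := out = validate_cas_checkdigit_alt cas_str
instance (cas_str : String) (out : Bool) : Decidable (Spec_validate_cas_checkdigit cas_str out) := by unfold Spec_validate_cas_checkdigit; infer_instance

-- ===== CLAIM (what is proved, stated in full; the proofs are below) =====
def Claim_equal_validate_cas_checkdigit : Prop := ∀ (cas_str : String), Dom_validate_cas_checkdigit cas_str → Spec_validate_cas_checkdigit cas_str (validate_cas_checkdigit cas_str)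

-- ===== LEMMAS AND PROOFS =====

-- weighted sum with weights i+1, i+2, …
def wsum : List Int → Int → Int
  | [], _ => 0
  | v :: vs, i => (i + 1) * v + wsum vs (i + 1)

-- sum of running prefix sums starting from run
def csum : List Int → Int → Int
  | [], _ => 0
  | v :: vs, run => (run + v) + csum vs (run + v)

theorem casLoopA_eq (l : List Char) : ∀ i tot,
    casLoopA l i tot = (casParse? l).map (fun vs => tot + wsum vs i) := by
  induction l with
  | nil => intro i tot; simp [casLoopA, casParse?, wsum]
  | cons c cs ih =>
    intro i tot
    cases h : PySem.Int.ofChars? [c] with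
    | none => simp [casLoopA, casParse?, h]
    | some v =>
      simp only [casLoopA, casParse?, h, Option.bind_some, ih]
      cases casParse? cs <;> simp [wsum] <;> ring

theorem casParse?_append (xs ys : List Char) :
    casParse? (xs ++ ys) = (casParse? xs).bind fun a => (casParse? ys).map (a ++ ·) := by
  induction xs with
  | nil => simp [casParse?]
  | cons c cs ih =>
    cases h : PySem.Int.ofChars? [c] with
    | none => simp [casParse?, h]
    | some v =>
      simp only [List.cons_append, casParse?, h, Option.bind_some, ih]
      cases casParse? cs <;> cases casParse? ys <;> simp

theorem casParse?_reverse (l : List Char) :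
    casParse? l.reverse = (casParse? l).map List.reverse := by
  induction l with
  | nil => simp [casParse?]
  | cons c cs ih =>
    simp only [List.reverse_cons, casParse?_append, ih, casParse?]
    cases h : PySem.Int.ofChars? [c] <;> [simp; (cases casParse? cs <;> simp)]

theorem wsum_append (vs : List Int) (v : Int) : ∀ i,
    wsum (vs ++ [v]) i = wsum vs i + (i + vs.length + 1) * v := by
  induction vs with
  | nil => intro i; simp [wsum]
  | cons w ws ih =>
    intro i
    simp only [List.cons_append, wsum, ih, List.length_cons]
    push_cast
    ring

theorem csum_eq_wsum_reverse (vs : List Int) : ∀ run,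
    csum vs run = run * vs.length + wsum vs.reverse 0 := by
  induction vs with
  | nil => intro run; simp [csum, wsum]
  | cons v ws ih =>
    intro run
    simp only [csum, ih, List.reverse_cons, wsum_append, List.length_cons, List.length_reverse]
    push_cast
    ring

theorem casRunTotal_go (vs : List Int) : ∀ r t,
    vs.foldl (fun p v => (p.1 + v, p.2 + (p.1 + v))) (r, t) = (r + vs.sum, t + csum vs r) := by
  induction vs with
  | nil => intro r t; simp [csum]
  | cons v ws ih =>
    intro r t
    simp only [List.foldl_cons, ih, List.sum_cons, csum, Prod.mk.injEq]
    constructor <;> ring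

theorem casRunTotal_snd (vs : List Int) : (casRunTotal vs).2 = csum vs 0 := by
  simp [casRunTotal, casRunTotal_go]

-- ===== VERDICT (by name: the statement is the Claim_ definition above) =====
theorem validate_cas_checkdigit_spec : Claim_equal_validate_cas_checkdigit := by
  intro s _
  unfold Spec_validate_cas_checkdigit validate_cas_checkdigit validate_cas_checkdigit_alt
  set l := (PySem.Str.replace s "-" "").toList with hl
  by_cases hlen : l.length < 4
  · simp [hlen]
  · have hne : l ≠ [] := by intro h; simp [h] at hlen
    have hsplit : l = l.dropLast ++ [l.getLast hne] := (List.dropLast_append_getLast hne).symm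
    simp only [hlen, if_false]
    rw [PySem.List.pyGet?_neg_one, List.getLast?_eq_some_getLast hne, PySem.List.slice_to_neg_one]
    rw [show casParse? l = casParse? (l.dropLast ++ [l.getLast hne]) from by rw [← hsplit]]
    rw [casParse?_append]
    cases hb : casParse? l.dropLast with
    | none =>
      simp only [Option.bind_none]
      rw [casLoopA_eq, casParse?_reverse, hb]
      cases PySem.Int.ofChars? [l.getLast hne] <;> simp
    | some bodyVals =>
      cases hc : PySem.Int.ofChars? [l.getLast hne] with
      | none => simp [casParse?, hc]
      | some check =>
        simp only [Option.bind_some, casParse?, hc, Option.bind_some, Option.map_some,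
          casParse?.eq_1, Option.map_some]
        rw [casLoopA_eq, casParse?_reverse, hb]
        rw [PySem.List.pop?_last]
        simp [casRunTotal_snd, csum_eq_wsum_reverse]
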